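-- pv_equiv track=rewrite | github.com/cqulilujia/cuRL | utils.py | path_reprocess
-- ===== SOURCE A (Python) =====
-- def path_reprocess(path_list):
--     dic = {}
--     for point in path_list:
--         if point not in dic.keys():
--             dic[point] = 1
--         else:
--             dic[point] = dic[point] + 1
--
--     is_loop = 0
--     pre_index = last_index = None
--     for key, value in dic.items():
--         if value > 1:
--             is_loop = 1
--             for i in range(len(path_list)):
--                 if path_list[i] == key:
--                     pre_index = i
--                     break
--             for i in range(len(path_list) - 1, -1, -1):
--                 if path_list[i] == key:
--                     last_index = i
--                     break
--             path_list = path_list[:pre_index + 1] + path_list[last_index + 1:]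
--             dic.pop(key)
--             break
--     if is_loop:
--         path_list = path_reprocess(path_list)
--     return path_list
-- ===== SOURCE B (Python) =====
-- def path_reprocess(path_list):
--     last = {}
--     for i, p in enumerate(path_list):
--         last[p] = i
--     out = []
--     i = 0
--     n = len(path_list)
--     while i < n:
--         p = path_list[i]
--         out.append(p)
--         i = last[p] + 1
--     return out
-- ===== Notes on version B (the rewrite author's own statement) =====
-- stated objective: faster
-- what changed: A repeatedly rebuilds a count dict, rescans for first/last occurrence of the first duplicated point and recurses on the spliced list; B builds a last-occurrence index once and emits the path in a single pass, jumping from each point directly past its last occurrence.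
import Mathlib
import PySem

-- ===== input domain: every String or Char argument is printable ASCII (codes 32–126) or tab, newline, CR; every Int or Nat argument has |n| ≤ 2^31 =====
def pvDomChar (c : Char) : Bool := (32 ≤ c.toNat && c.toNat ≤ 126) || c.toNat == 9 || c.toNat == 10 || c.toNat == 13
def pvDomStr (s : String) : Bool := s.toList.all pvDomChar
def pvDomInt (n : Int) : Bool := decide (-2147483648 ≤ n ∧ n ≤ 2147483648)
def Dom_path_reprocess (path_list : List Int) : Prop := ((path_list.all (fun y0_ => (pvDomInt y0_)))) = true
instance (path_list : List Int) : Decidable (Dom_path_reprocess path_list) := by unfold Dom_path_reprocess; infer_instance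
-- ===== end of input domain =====

-- B replaces A's repeated rebuild-dict / rescan / splice / recurse loop removal by one pass over a
-- precomputed last-occurrence index, jumping from each point directly past its last occurrence;
-- the return values are proved equal on all inputs.

-- ===== PORT A =====

def pvScanA (xs : List Int) (k : Int) : List Int → Option Int
  | [] => none
  | i :: rest => if PySem.List.pyGetD xs i 0 == k then some i else pvScanA xs k rest

def path_reprocess_go : Nat → List Int → List Int
  | 0, path_list => path_list
  | fuel+1, path_list =>
    let dic : PySem.Dict Int Int := path_list.foldl (fun d point =>
      if !(d.contains point) then d.insert point 1
      else d.insert point (d.getD point 0 + 1)) PySem.Dict.empty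
    match dic.items.find? (fun kv => decide (kv.2 > 1)) with
    | none => path_list
    | some (key, _value) =>
      match pvScanA path_list key (PySem.List.pyRange 0 (path_list.length : Int) 1),
            pvScanA path_list key (PySem.List.pyRange ((path_list.length : Int) - 1) (-1) (-1)) with
      | some pre_index, some last_index =>
          path_reprocess_go fuel
            (PySem.List.slice path_list none (some (pre_index + 1)) ++
             PySem.List.slice path_list (some (last_index + 1)) none)
      | _, _ => path_list

def path_reprocess (path_list : List Int) : List Int :=
  path_reprocess_go (path_list.length + 1) path_list

-- ===== PORT B =====

def pvLastTable (path_list : List Int) : PySem.Dict Int Int :=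
  (PySem.List.enumerate path_list 0).foldl (fun d ip => d.insert ip.2 ip.1) PySem.Dict.empty

def path_reprocess_alt_go (path_list : List Int) (last : PySem.Dict Int Int) (n : Int) :
    Nat → Int → List Int
  | 0, _ => []
  | fuel+1, i =>
    if i < n then
      let p := PySem.List.pyGetD path_list i 0
      p :: path_reprocess_alt_go path_list last n fuel (last.getD p 0 + 1)
    else []

def path_reprocess_alt (path_list : List Int) : List Int :=
  path_reprocess_alt_go path_list (pvLastTable path_list) (path_list.length : Int)
    (path_list.length + 1) 0

-- ===== PRECONDITION & SPEC =====
def Spec_path_reprocess (path_list : List Int) (out : List Int) : Prop := out = path_reprocess_alt path_list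
instance (path_list : List Int) (out : List Int) : Decidable (Spec_path_reprocess path_list out) := by unfold Spec_path_reprocess; infer_instance

-- ===== CLAIM (what is proved, stated in full; the proofs are below) =====
def Claim_equal_path_reprocess : Prop := ∀ (path_list : List Int), Dom_path_reprocess path_list → Spec_path_reprocess path_list (path_reprocess path_list)

-- ===== LEMMAS AND PROOFS =====

def pvLast? (xs : List Int) (p : Int) : Option Nat :=
  match PySem.List.index? xs.reverse p with
  | none => none
  | some j => some (xs.length - 1 - j)

theorem pvLast?_of_not_mem {xs : List Int} {p : Int} (h : p ∉ xs) : pvLast? xs p = none := by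
  unfold pvLast?
  rw [(PySem.List.index?_eq_none_iff _ _).mpr (by simpa using h)]

theorem pvLast?_concat (xs : List Int) (y p : Int) :
    pvLast? (xs ++ [y]) p = if p = y then some xs.length else pvLast? xs p := by
  unfold pvLast?
  rw [show (xs ++ [y]).reverse = y :: xs.reverse by simp]
  by_cases hpy : p = y
  · subst hpy
    rw [PySem.List.index?_cons_self]
    simp
  · rw [PySem.List.index?_cons_of_ne xs.reverse (Ne.symm hpy), if_neg hpy]
    cases hj : PySem.List.index? xs.reverse p with
    | none => simp
    | some j =>
      simp only [Option.map_some]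
      simp only [Option.some.injEq, List.length_append, List.length_cons, List.length_nil]
      omega

theorem pvLast?_split {p : Int} {w : List Int} (u : List Int) (h : p ∉ w) :
    pvLast? (u ++ p :: w) p = some u.length := by
  induction w using List.reverseRecOn with
  | nil => rw [show u ++ [p] = u ++ [p] from rfl, pvLast?_concat, if_pos rfl]
  | append_singleton w' y ih =>
    have hy : p ≠ y := by intro he; exact h (by simp [he])
    rw [show u ++ p :: (w' ++ [y]) = (u ++ p :: w') ++ [y] by simp, pvLast?_concat, if_neg hy,
      ih (fun hm => h (by simp [hm]))]

theorem pvLastSplit {p : Int} {r : List Int} (h : p ∈ r) :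
    ∃ m w, r = m ++ p :: w ∧ p ∉ w := by
  induction r using List.reverseRecOn with
  | nil => simp at h
  | append_singleton r' y ih =>
    by_cases hy : p = y
    · exact ⟨r', [], by simp [hy], by simp⟩
    · have hp : p ∈ r' := by
        rcases List.mem_append.mp h with h1 | h2
        · exact h1
        · simp at h2; exact absurd h2 hy
      obtain ⟨m, w, hr, hw⟩ := ih hp
      exact ⟨m, w ++ [y], by simp [hr], by simp [hw, hy]⟩

theorem pvLastTable_get? (xs : List Int) (p : Int) :
    (pvLastTable xs).get? p = (pvLast? xs p).map (fun n => (n : Int)) := by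
  induction xs using List.reverseRecOn with
  | nil =>
    show (PySem.Dict.empty (κ := Int) (ν := Int)).get? p = _
    rw [pvLast?_of_not_mem (by simp)]
    simp [PySem.Dict.get?_empty]
  | append_singleton xs y ih =>
    have hstep : pvLastTable (xs ++ [y]) = (pvLastTable xs).insert y (xs.length : Int) := by
      unfold pvLastTable
      rw [PySem.List.enumerate_append, List.foldl_append]
      simp
    rw [hstep, PySem.Dict.get?_insert, pvLast?_concat]
    by_cases hp : p = y <;> simp [hp, ih]

def pvR : List Int → List Int
  | [] => []
  | x :: r =>
    match pvLast? r x with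
    | none => x :: pvR r
    | some j => x :: pvR (r.drop (j + 1))
  termination_by l => l.length
  decreasing_by
    all_goals (simp; try omega)

theorem pvR_nil : pvR [] = [] := by
  rw [pvR]

theorem pvR_cons_not_mem {x : Int} {r : List Int} (h : x ∉ r) : pvR (x :: r) = x :: pvR r := by
  rw [pvR, pvLast?_of_not_mem h]

theorem pvR_cons_split {x : Int} {w : List Int} (m : List Int) (h : x ∉ w) :
    pvR (x :: (m ++ x :: w)) = x :: pvR w := by
  rw [pvR, pvLast?_split m h]
  have : (m ++ x :: w).drop (m.length + 1) = w := by
    rw [List.drop_append]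
    simp
  simp only [this]

theorem pvR_prefix {u v : List Int} (h : ∀ x ∈ u, (u ++ v).count x = 1) :
    pvR (u ++ v) = u ++ pvR v := by
  induction u with
  | nil => simp
  | cons x t ih =>
    have hx1 : (x :: (t ++ v)).count x = 1 := by simpa using h x (by simp)
    have hxn : x ∉ t ++ v := by
      have := List.count_cons_self (a := x) (l := t ++ v)
      have hc : (t ++ v).count x = 0 := by omega
      exact List.count_eq_zero.mp hc
    rw [List.cons_append, pvR_cons_not_mem hxn, ih ?_]
    · simp
    intro y hy
    have hyx : y ≠ x := by
      intro he; subst he; exact hxn (by simp [hy])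
    have := h y (by simp [hy])
    rw [List.cons_append] at this
    simp [Ne.symm hyx] at this
    simpa using this  -- count_cons handled by simp default

theorem pvR_nodup {xs : List Int} (h : xs.Nodup) : pvR xs = xs := by
  have := pvR_prefix (u := xs) (v := [])
    (by intro x hx; simpa using List.count_eq_one_of_mem h hx)
  simpa [pvR_nil] using this

theorem pvB_go_eq (fuel : Nat) (xs : List Int) (i : Nat) (h : xs.length - i < fuel) :
    path_reprocess_alt_go xs (pvLastTable xs) (xs.length : Int) fuel (i : Int) = pvR (xs.drop i) := by
  induction fuel generalizing i with
  | zero => omega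
  | succ fuel ih =>
    rw [path_reprocess_alt_go]
    by_cases hi : i < xs.length
    · rw [if_pos (by exact_mod_cast hi)]
      obtain ⟨p, hpeq⟩ : ∃ p, xs[i] = p := ⟨_, rfl⟩
      have hget : PySem.List.pyGetD xs (i : Int) 0 = p := by
        rw [PySem.List.pyGetD_natCast, List.getD_eq_getElem _ _ hi, hpeq]
      have hdrop : xs.drop i = p :: xs.drop (i + 1) := by
        rw [List.drop_eq_getElem_cons hi, hpeq]
      have htd : xs = xs.take i ++ p :: xs.drop (i + 1) := by
        conv_lhs => rw [← List.take_append_drop i xs, hdrop]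
      have hlen : (xs.take i).length = i := by simp; omega
      show PySem.List.pyGetD xs (↑i) 0 ::
          path_reprocess_alt_go xs (pvLastTable xs) (↑xs.length) fuel
            ((pvLastTable xs).getD (PySem.List.pyGetD xs (↑i) 0) 0 + 1) = pvR (xs.drop i)
      rw [hget]
      by_cases hp : p ∈ xs.drop (i + 1)
      · obtain ⟨m, w, hrw, hpw⟩ := pvLastSplit hp
        have hxs2 : xs = (xs.take i ++ p :: m) ++ p :: w := by
          conv_lhs => rw [htd, hrw]
          simp
        have hL : pvLast? xs p = some (i + m.length + 1) := by
          conv_lhs => rw [hxs2]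
          rw [pvLast?_split _ hpw]
          simp [hlen]; omega
        have hgetD : (pvLastTable xs).getD p 0 + 1 = ((i + m.length + 1 + 1 : Nat) : Int) := by
          rw [PySem.Dict.getD_eq_get?_getD, pvLastTable_get?, hL]
          push_cast; simp
        have hdropL : xs.drop (i + m.length + 1 + 1) = w := by
          conv_lhs => rw [hxs2]
          rw [List.drop_append]
          have hl2 : (xs.take i ++ p :: m).length = i + m.length + 1 := by simp [hlen]; omega
          simp [hl2]
        rw [hgetD, ih _ (by omega), hdropL, hdrop, hrw, pvR_cons_split m hpw]
      · have hL : pvLast? xs p = some i := by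
          conv_lhs => rw [htd]
          rw [pvLast?_split _ hp, hlen]
        have hgetD : (pvLastTable xs).getD p 0 + 1 = ((i + 1 : Nat) : Int) := by
          rw [PySem.Dict.getD_eq_get?_getD, pvLastTable_get?, hL]
          push_cast; simp
        rw [hgetD, ih _ (by omega), hdrop, pvR_cons_not_mem hp]
    · rw [if_neg (by exact_mod_cast hi)]
      rw [List.drop_eq_nil_of_le (by omega), pvR_nil]

theorem pvAlt_eq_R (xs : List Int) : path_reprocess_alt xs = pvR xs := by
  unfold path_reprocess_alt
  have := pvB_go_eq (xs.length + 1) xs 0 (by omega)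
  simpa using this

theorem pvScanA_fwd (xs : List Int) (k : Int) :
    ∀ (d a : Nat), xs.length - a = d → a ≤ xs.length →
    pvScanA xs k (PySem.List.pyRange (a : Int) (xs.length : Int) 1) =
      (PySem.List.index? (xs.drop a) k).map (fun n => ((a + n : Nat) : Int)) := by
  intro d
  induction d with
  | zero =>
    intro a hd ha
    have : a = xs.length := by omega
    subst this
    rw [PySem.List.pyRange_one_eq_nil (le_refl _), List.drop_length,
      (PySem.List.index?_eq_none_iff _ _).mpr (by simp)]
    rfl
  | succ d ihd =>
    intro a hd ha
    have hlt : a < xs.length := by omega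
    rw [PySem.List.pyRange_one_cons (by exact_mod_cast hlt)]
    have hget : PySem.List.pyGetD xs (a : Int) 0 = xs[a] := by
      rw [PySem.List.pyGetD_natCast, List.getD_eq_getElem _ _ hlt]
    have hdrop : xs.drop a = xs[a] :: xs.drop (a + 1) := List.drop_eq_getElem_cons hlt
    rw [pvScanA, hget, hdrop]
    by_cases hk : xs[a] = k
    · rw [if_pos (by simp [hk]), hk, PySem.List.index?_cons_self]
      simp
    · rw [if_neg (by simp [hk]), PySem.List.index?_cons_of_ne _ hk]
      have : ((a : Int) + 1) = ((a + 1 : Nat) : Int) := by push_cast; ring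
      rw [this, ihd (a + 1) (by omega) (by omega)]
      cases PySem.List.index? (xs.drop (a + 1)) k with
      | none => simp
      | some n =>
        simp only [Option.map_some, Option.some.injEq]
        push_cast; ring

theorem pvScanA_bwd (xs : List Int) (k : Int) :
    ∀ (m : Nat), m ≤ xs.length →
    pvScanA xs k (PySem.List.pyRange ((m : Int) - 1) (-1) (-1)) =
      (pvLast? (xs.take m) k).map (fun n => (n : Int)) := by
  intro m
  induction m with
  | zero =>
    intro _
    rw [show ((0 : Nat) : Int) - 1 = -1 by ring, PySem.List.pyRange_neg_one_eq_nil (le_refl _)]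
    rw [List.take_zero, pvLast?_of_not_mem (by simp)]
    rfl
  | succ m ih =>
    intro hm
    have hlt : m < xs.length := by omega
    have h1 : ((m + 1 : Nat) : Int) - 1 = (m : Int) := by push_cast; ring
    rw [h1, PySem.List.pyRange_neg_one_cons (by omega)]
    have hget : PySem.List.pyGetD xs (m : Int) 0 = xs[m] := by
      rw [PySem.List.pyGetD_natCast, List.getD_eq_getElem _ _ hlt]
    have htake : xs.take (m + 1) = xs.take m ++ [xs[m]] := by
      rw [List.take_add_one, List.getElem?_eq_getElem hlt]
      rfl
    rw [pvScanA, hget, htake, pvLast?_concat]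
    by_cases hk : xs[m] = k
    · rw [if_pos (by simp [hk]), if_pos hk.symm]
      simp [List.length_take, Nat.min_eq_left (le_of_lt hlt)]
    · rw [if_neg (by simp [hk]), if_neg (fun he => hk he.symm), ih (by omega)]

theorem pvDic_eq (xs : List Int) :
    xs.foldl (fun d point =>
      if !(d.contains point) then d.insert point 1
      else d.insert point (d.getD point 0 + 1)) PySem.Dict.empty = PySem.Dict.counter xs := by
  rw [← PySem.Dict.foldl_insert_getD_add_one_eq_counter]
  apply PySem.List.foldl_congr_mem
  intro acc x _
  by_cases hc : acc.contains x
  · simp [hc]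
  · have hcf : acc.contains x = false := by simpa using hc
    have h0 : acc.getD x 0 = 0 := by
      first
        | exact PySem.Dict.getD_of_not_contains _ hcf
        | exact PySem.Dict.getD_of_not_contains hcf
        | simp [PySem.Dict.getD_of_not_contains, hcf]
    simp [hc, h0]

theorem pvFind_ofList (xs : List Int) (p : Int → Bool) (k : Int)
    (h : (PySem.Set.ofList xs).find? p = some k) :
    ∃ u t, xs = u ++ k :: t ∧ ∀ x ∈ u, p x = false := by
  induction xs using List.reverseRecOn with
  | nil => simp [PySem.Set.ofList] at h
  | append_singleton xs y ih =>
    have hstep : PySem.Set.ofList (xs ++ [y]) = PySem.Set.add (PySem.Set.ofList xs) y := by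
      rw [PySem.Set.ofList_eq_foldl, PySem.Set.ofList_eq_foldl, List.foldl_append]
      rfl
    rw [hstep] at h
    unfold PySem.Set.add at h
    by_cases hy : PySem.Set.contains (PySem.Set.ofList xs) y
    · rw [if_pos hy] at h
      obtain ⟨u, t, hxt, hu⟩ := ih h
      exact ⟨u, t ++ [y], by simp [hxt], hu⟩
    · rw [if_neg hy] at h
      rw [List.find?_append] at h
      cases hfx : (PySem.Set.ofList xs).find? p with
      | some k' =>
        rw [hfx] at h
        simp at h
        obtain ⟨u, t, hxt, hu⟩ := ih (by rw [hfx, h])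
        exact ⟨u, t ++ [y], by simp [hxt], hu⟩
      | none =>
        rw [hfx] at h
        simp only [Option.none_or] at h
        by_cases hpy : p y
        · rw [List.find?_cons_of_pos hpy] at h
          have hk : k = y := by
            injection h with h'
            exact h'.symm
          refine ⟨xs, [], by simp [hk], ?_⟩
          intro x hx
          have hmem : x ∈ PySem.Set.ofList xs := (PySem.Set.mem_ofList _ _).mpr hx
          have := List.find?_eq_none.mp hfx x hmem
          simpa using this
        · rw [List.find?_cons_of_neg hpy] at h
          exact absurd h (by simp)

theorem pvIndex?_first {k : Int} {u : List Int} (t : List Int) (h : k ∉ u) :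
    PySem.List.index? (u ++ k :: t) k = some u.length := by
  rw [PySem.List.index?_eq_some_iff]
  exact ⟨u, t, rfl, rfl, h⟩

theorem pvA_go_eq (fuel : Nat) (xs : List Int) (h : xs.length < fuel) :
    path_reprocess_go fuel xs = pvR xs := by
  induction fuel generalizing xs with
  | zero => omega
  | succ fuel ih =>
    simp only [path_reprocess_go]
    rw [pvDic_eq, PySem.Dict.items_counter, List.find?_map]
    cases hf : (PySem.Set.ofList xs).find?
        ((fun kv => decide (kv.2 > 1)) ∘ (fun k => (k, (List.count k xs : Int)))) with
    | none =>
      simp only [Option.map_none]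
      have hnd : xs.Nodup := by
        rw [List.nodup_iff_count_le_one]
        intro a
        by_cases ha : a ∈ xs
        · have := List.find?_eq_none.mp hf a ((PySem.Set.mem_ofList _ _).mpr ha)
          simp only [Function.comp_apply, decide_eq_true_eq, not_lt] at this
          exact_mod_cast this
        · simp [List.count_eq_zero.mpr ha]
      rw [pvR_nodup hnd]
    | some k =>
      simp only [Option.map_some]
      have hcnt : 2 ≤ List.count k xs := by
        have := List.find?_some hf
        simp only [Function.comp_apply, decide_eq_true_eq] at this
        exact_mod_cast this
      obtain ⟨u, t, hxt, hu⟩ := pvFind_ofList xs _ k hf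
      have hu1 : ∀ x ∈ u, List.count x xs = 1 := by
        intro x hx
        have hf0 := hu x hx
        simp only [Function.comp_apply, decide_eq_false_iff_not, not_lt] at hf0
        have hmem : x ∈ xs := by rw [hxt]; simp [hx]
        have hpos := List.count_pos_iff.mpr hmem
        have : (List.count x xs : Int) ≤ 1 := hf0
        omega
      have hku : k ∉ u := by
        intro hk
        have := hu1 k hk
        omega
      have hkt : k ∈ t := by
        have hsplit : List.count k xs = List.count k u + List.count k (k :: t) := by
          rw [hxt, List.count_append]
        rw [List.count_cons_self] at hsplit
        have hcu : List.count k u = 0 := List.count_eq_zero.mpr hku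
        exact List.count_pos_iff.mp (by omega)
      obtain ⟨m, w, htw, hkw⟩ := pvLastSplit hkt
      have hxs2 : xs = u ++ k :: (m ++ k :: w) := by rw [hxt, htw]
      have hidx : PySem.List.index? xs k = some u.length := by
        rw [hxt]; exact pvIndex?_first t hku
      have hfwd : pvScanA xs k (PySem.List.pyRange 0 (xs.length : Int) 1) = some (u.length : Int) := by
        have hsc := pvScanA_fwd xs k xs.length 0 (by omega) (by omega)
        simp only [Nat.cast_zero, List.drop_zero] at hsc
        rw [hsc, hidx]
        simp
      have hlast : pvLast? xs k = some (u.length + m.length + 1) := by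
        have hx3 : xs = (u ++ k :: m) ++ k :: w := by rw [hxs2]; simp
        conv_lhs => rw [hx3]
        rw [pvLast?_split _ hkw]
        simp only [List.length_append, List.length_cons, Option.some.injEq]
        omega
      have hbwd : pvScanA xs k (PySem.List.pyRange ((xs.length : Int) - 1) (-1) (-1)) =
          some ((u.length + m.length + 1 : Nat) : Int) := by
        have hsc := pvScanA_bwd xs k xs.length (le_refl _)
        rw [List.take_length] at hsc
        rw [hsc, hlast]
        simp
      rw [hfwd, hbwd]
      have hs1 : PySem.List.slice xs none (some ((u.length : Int) + 1)) = u ++ [k] := by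
        have h1 : ((u.length : Int) + 1) = ((u.length + 1 : Nat) : Int) := by push_cast; ring
        rw [h1, PySem.List.slice_to_natCast,
          show xs = (u ++ [k]) ++ t by rw [hxt]; simp,
          List.take_left' (by simp)]
      have hs2 : PySem.List.slice xs (some (((u.length + m.length + 1 : Nat) : Int) + 1)) none = w := by
        have h2 : (((u.length + m.length + 1 : Nat) : Int) + 1) = ((u.length + m.length + 2 : Nat) : Int) := by
          push_cast; ring
        rw [h2, PySem.List.slice_from_natCast,
          show xs = (u ++ k :: m ++ [k]) ++ w by rw [hxs2]; simp,
          List.drop_left' (by simp; omega)]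
      show path_reprocess_go fuel
          (PySem.List.slice xs none (some ((u.length : Int) + 1)) ++
           PySem.List.slice xs (some (((u.length + m.length + 1 : Nat) : Int) + 1)) none) = pvR xs
      rw [hs1, hs2]
      have hlenxs : xs.length = u.length + m.length + w.length + 2 := by
        rw [hxs2]; simp; omega
      have hlencut : ((u ++ [k]) ++ w).length = u.length + w.length + 1 := by
        simp; omega
      rw [ih _ (by omega)]
      have hcutpre : ∀ x ∈ u ++ [k], List.count x ((u ++ [k]) ++ w) = 1 := by
        intro x hx
        rcases List.mem_append.mp hx with hxu | hxk
        · have hx1 := hu1 x hxu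
          have hxk' : ¬ (k = x) := fun he => by rw [← he] at hx1; omega
          have ecut : List.count x ((u ++ [k]) ++ w) = List.count x u + List.count x w := by
            simp [List.count_append, hxk']
          have exs : List.count x xs = List.count x u + List.count x m + List.count x w := by
            rw [hxs2]; simp [List.count_append, hxk']; omega
          have hpos : 0 < List.count x u := List.count_pos_iff.mpr hxu
          omega
        · have hxk : x = k := by simpa using hxk
          subst hxk
          have hcu : List.count x u = 0 := List.count_eq_zero.mpr hku
          have hcw : List.count x w = 0 := List.count_eq_zero.mpr hkw
          simp [List.count_append, hcu, hcw]
      rw [pvR_prefix hcutpre,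
        show pvR xs = u ++ pvR (k :: (m ++ k :: w)) by
          rw [hxs2]
          exact pvR_prefix (by intro x hx; rw [← hxs2]; exact hu1 x hx),
        pvR_cons_split m hkw]
      simp

-- ===== VERDICT (by name: the statement is the Claim_ definition above) =====
theorem path_reprocess_spec : Claim_equal_path_reprocess := by
  intro xs _
  unfold Spec_path_reprocess
  rw [path_reprocess, pvA_go_eq _ _ (Nat.lt_succ_self _), pvAlt_eq_R]
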